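-- pv_equiv track=rewrite | github.com/AndreMiguelAlves/Andre_Alves_exerciciostpsi0226 | Exercícios/Exercícios Sort/5.py | agrupar_e_ordenar
-- ===== SOURCE A (Python) =====
-- def ordenar_lista(lista):
--
--     n = len(lista)
--     for i in range(n):
--         for j in range(0, n - i - 1):
--             if lista[j] > lista[j + 1]:
--                 lista[j], lista[j + 1] = lista[j + 1], lista[j]
--     return lista
--
-- def agrupar_e_ordenar(lista_palavras):
--     dicionario = {}
--
--
--     for palavra in lista_palavras:
--
--         letra = palavra[0].lower()
--
--         if letra not in dicionario:
--             dicionario[letra] = []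
--
--         dicionario[letra].append(palavra)
--
--
--     for chave in dicionario:
--         dicionario[chave] = ordenar_lista(dicionario[chave])
--
--     return dicionario
-- ===== SOURCE B (Python) =====
-- def agrupar_e_ordenar(lista_palavras):
--     # keys in first-appearance order; one global sort, stable, so each group
--     # comes out already sorted -- no per-group sorting pass at all
--     dicionario = {palavra[0].lower(): [] for palavra in lista_palavras}
--     for palavra in sorted(lista_palavras):
--         dicionario[palavra[0].lower()].append(palavra)
--     return dicionario
-- ===== Notes on version B (the rewrite author's own statement) =====
-- stated objective: faster
-- what changed: Instead of grouping first and bubble-sorting each group (O(g^2) per group), B sorts the whole list once with Python's stable sort and fills the groups from the sorted list, so every group comes out already sorted; key insertion order (first appearance in the original list) is preserved by a dict-comprehension pass over the original list.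
import Mathlib
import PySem

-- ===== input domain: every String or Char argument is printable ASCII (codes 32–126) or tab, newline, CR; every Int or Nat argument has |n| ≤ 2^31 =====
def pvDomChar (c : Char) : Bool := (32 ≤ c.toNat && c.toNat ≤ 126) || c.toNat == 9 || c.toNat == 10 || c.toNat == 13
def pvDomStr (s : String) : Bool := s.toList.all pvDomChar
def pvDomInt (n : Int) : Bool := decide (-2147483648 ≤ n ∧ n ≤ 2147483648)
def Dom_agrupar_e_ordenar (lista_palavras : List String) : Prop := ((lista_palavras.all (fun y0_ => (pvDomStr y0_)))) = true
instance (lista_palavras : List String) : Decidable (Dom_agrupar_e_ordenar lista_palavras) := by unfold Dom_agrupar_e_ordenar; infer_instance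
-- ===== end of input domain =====

-- B replaces A's per-group bubble sort by one global stable sort of the whole list
-- (stability leaves every first-letter group already sorted); return-value equivalence.


-- ===== PORT A =====
-- lista[j], lista[j+1] = lista[j+1], lista[j]  guarded by  lista[j] > lista[j+1]
-- (pyGet?/pySet? are Python-exact; both indices come from range(0, n-i-1))

def pvSwapStep (l : List String) (j : Int) : List String :=
  match PySem.List.pyGet? l j, PySem.List.pyGet? l (j + 1) with
  | some a, some b =>
    if a > b then
      match PySem.List.pySet? l j b with
      | some l1 =>
        match PySem.List.pySet? l1 (j + 1) a with
        | some l2 => l2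
        | none => l1
      | none => l
    else l
  | _, _ => l


def ordenar_lista (lista : List String) : List String :=
  let n : Int := lista.length
  (PySem.List.pyRange 0 n).foldl
    (fun l i => (PySem.List.pyRange 0 (n - i - 1)).foldl pvSwapStep l) lista


def pvStepA (d : PySem.Dict String (List String)) (palavra : String) :
    PySem.Dict String (List String) :=
  match PySem.Str.pyGet? palavra 0 with
  | none => d
  | some c =>
    let letra := String.ofList [PySem.Chars.lowerChar c]
    let d' := if d.contains letra then d else d.insert letra []
    d'.modify letra [] (fun g => g ++ [palavra])


def agrupar_e_ordenar (lista_palavras : List String) : List (String × List String) :=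
  let d1 := lista_palavras.foldl pvStepA PySem.Dict.empty
  let d2 := d1.keys.foldl
    (fun d chave => d.insert chave (ordenar_lista (d.getD chave []))) d1
  d2.items

-- ===== PORT B =====

def pvStepB0 (d : PySem.Dict String (List String)) (palavra : String) :
    PySem.Dict String (List String) :=
  match PySem.Str.pyGet? palavra 0 with
  | none => d
  | some c => d.insert (String.ofList [PySem.Chars.lowerChar c]) []


def pvStepB1 (d : PySem.Dict String (List String)) (palavra : String) :
    PySem.Dict String (List String) :=
  match PySem.Str.pyGet? palavra 0 with
  | none => d
  | some c => d.modify (String.ofList [PySem.Chars.lowerChar c]) [] (fun g => g ++ [palavra])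


def agrupar_e_ordenar_alt (lista_palavras : List String) : List (String × List String) :=
  let d0 := lista_palavras.foldl pvStepB0 PySem.Dict.empty
  let d := (PySem.List.sorted lista_palavras (fun x => x)).foldl pvStepB1 d0
  d.items

-- ===== PRECONDITION & SPEC =====
-- Pre_ excludes lists containing the empty string, on which A raises IndexError (palavra[0]).
def Pre_agrupar_e_ordenar (lista_palavras : List String) : Prop :=
  ∀ w ∈ lista_palavras, w.toList ≠ []
instance (lista_palavras : List String) : Decidable (Pre_agrupar_e_ordenar lista_palavras) := by unfold Pre_agrupar_e_ordenar; infer_instance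

def pvWitness_agrupar_e_ordenar : List String := ["banana", "Abacaxi", "bola", "ave"]

def Spec_agrupar_e_ordenar (lista_palavras : List String) (out : List (String × List String)) : Prop := out = agrupar_e_ordenar_alt lista_palavras
instance (lista_palavras : List String) (out : List (String × List String)) : Decidable (Spec_agrupar_e_ordenar lista_palavras out) := by unfold Spec_agrupar_e_ordenar; infer_instance

-- ===== CLAIM (what is proved, stated in full; the proofs are below) =====
def Claim_equal_agrupar_e_ordenar : Prop := ∀ (lista_palavras : List String), Dom_agrupar_e_ordenar lista_palavras → Pre_agrupar_e_ordenar lista_palavras → Spec_agrupar_e_ordenar lista_palavras (agrupar_e_ordenar lista_palavras)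

-- ===== LEMMAS AND PROOFS =====

def swpN (xs : List String) (j : Nat) : List String :=
  match xs[j]?, xs[j+1]? with
  | some a, some b => if a > b then (xs.set j b).set (j+1) a else xs
  | _, _ => xs


theorem swp_eq_swpN (xs : List String) (j : Nat) : pvSwapStep xs (j : Int) = swpN xs j := by
  have hcast : ((j:Int)+1) = ((j+1 : Nat) : Int) := by push_cast; ring
  unfold pvSwapStep swpN
  rw [PySem.List.pyGet?_natCast,
    show PySem.List.pyGet? xs ((j:Int)+1) = xs[j+1]? from by rw [hcast, PySem.List.pyGet?_natCast]]
  rcases h1 : xs[j]? with _ | a <;> rcases h2 : xs[j+1]? with _ | b <;> simp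
  have hj1 : j + 1 < xs.length := by
    have := List.getElem?_eq_some_iff.mp h2; exact this.1
  have hs1 : PySem.List.pySet? xs (j:Int) b = some (xs.set j b) := by
    simp only [PySem.List.pySet?, PySem.List.pyIdx?]
    have h0 : (0:Int) ≤ (j:Int) := by positivity
    rw [if_pos h0, if_pos (by exact_mod_cast by omega : (j:Int) < xs.length)]
    simp
  have hs2 : PySem.List.pySet? (xs.set j b) ((j:Int)+1) a = some ((xs.set j b).set (j+1) a) := by
    simp only [PySem.List.pySet?, PySem.List.pyIdx?, List.length_set]
    rw [if_pos (by positivity), if_pos (by exact_mod_cast by omega : (j:Int)+1 < xs.length)]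
    simp
  simp [hs1, hs2]


def passK : Nat → List String → List String
  | 0, l => l
  | _+1, [] => []
  | _+1, [a] => [a]
  | k+1, a :: b :: t => if a > b then b :: passK k (a :: t) else a :: passK k (b :: t)


theorem swpN_zero (a b : String) (t : List String) :
    swpN (a :: b :: t) 0 = if a > b then b :: a :: t else a :: b :: t := by
  simp [swpN]


theorem swpN_cons_succ (c : String) (r : List String) (j : Nat) :
    swpN (c :: r) (j + 1) = c :: swpN r j := by
  unfold swpN
  rcases h1 : r[j]? with _ | a <;> rcases h2 : r[j+1]? with _ | b <;>
    simp [h1, h2, List.set_cons_succ] <;> split <;> rfl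


theorem foldl_swpN_cons (js : List Nat) (c : String) (r : List String) :
    js.foldl (fun l j => swpN l (j + 1)) (c :: r) = c :: js.foldl swpN r := by
  induction js generalizing r with
  | nil => rfl
  | cons j js ih => simp [List.foldl_cons, swpN_cons_succ, ih]


theorem range_foldl_swpN (k : Nat) (l : List String) (hk : k < l.length) :
    (List.range k).foldl swpN l = passK k l := by
  induction k generalizing l with
  | zero => rfl
  | succ k ih =>
    match l with
    | [] => simp at hk
    | [a] => simp at hk
    | a :: b :: t =>
      rw [List.range_succ_eq_map, List.foldl_cons, List.foldl_map, swpN_zero]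
      have hlt : k < t.length + 1 := by simp at hk; omega
      by_cases hab : a > b <;>
        simp only [hab, if_pos, if_neg, if_true, if_false, passK, Nat.succ_eq_add_one] <;>
        · rw [show (fun (x : List String) (y : Nat) => swpN x (y+1)) = (fun l j => swpN l (j+1)) from rfl,
            foldl_swpN_cons]
          congr 1
          exact ih _ (by simpa using hlt)


theorem length_passK (k : Nat) (l : List String) : (passK k l).length = l.length := by
  induction k generalizing l with
  | zero => rfl
  | succ k ih =>
    match l with
    | [] => rfl
    | [a] => rfl
    | a :: b :: t => by_cases hab : a > b <;> simp [passK, hab, ih]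


theorem perm_passK (k : Nat) (l : List String) : (passK k l).Perm l := by
  induction k generalizing l with
  | zero => exact List.Perm.refl l
  | succ k ih =>
    match l with
    | [] => exact List.Perm.refl _
    | [a] => exact List.Perm.refl _
    | a :: b :: t =>
      by_cases hab : a > b <;> simp only [passK, hab, if_pos, if_neg, if_true, if_false]
      · exact ((ih (a :: t)).cons b).trans (List.Perm.swap' a b (List.Perm.refl t))
      · exact (ih (b :: t)).cons a


theorem drop_passK (k : Nat) (l : List String) :
    (passK k l).drop (k+1) = l.drop (k+1) := by
  induction k generalizing l with
  | zero => cases l <;> rfl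
  | succ k ih =>
    match l with
    | [] => rfl
    | [a] => rfl
    | a :: b :: t =>
      by_cases hab : a > b <;> simp only [passK, hab, if_pos, if_neg, if_true, if_false] <;>
        · rw [List.drop_succ_cons]
          rw [ih]
          rfl


theorem max_passK (k : Nat) (l : List String) (hk : k < l.length) :
    ∀ x ∈ l.take (k+1), x ≤ (passK k l).getD k "" := by
  induction k generalizing l with
  | zero =>
    match l, hk with
    | a :: t, _ => intro x hx; simp at hx; simp [passK, hx]
  | succ k ih =>
    match l with
    | [a] => simp at hk
    | a :: b :: t =>
      have hk' : k < t.length + 1 := by simp at hk; omega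
      have hka : k < (a :: t).length := by simpa using hk'
      have hkb : k < (b :: t).length := by simpa using hk'
      intro x hx
      simp only [List.take_succ_cons, List.mem_cons] at hx
      by_cases hab : a > b <;>
        simp only [passK, hab, if_pos, if_neg, if_true, if_false] <;> rw [List.getD_cons_succ]
      · rcases hx with h | h | h
        · calc x ≤ a := le_of_eq h
               _ ≤ (passK k (a :: t)).getD k "" := ih (a :: t) hka _ (by simp)
        · calc x ≤ a := h ▸ le_of_lt hab
               _ ≤ (passK k (a :: t)).getD k "" := ih (a :: t) hka _ (by simp)
        · exact ih (a :: t) hka _ (by rw [List.take_succ_cons]; exact List.mem_cons_of_mem _ h)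
      · rcases hx with h | h | h
        · calc x ≤ b := h ▸ not_lt.mp hab
               _ ≤ (passK k (b :: t)).getD k "" := ih (b :: t) hkb _ (by simp)
        · calc x ≤ b := le_of_eq h
               _ ≤ (passK k (b :: t)).getD k "" := ih (b :: t) hkb _ (by simp)
        · exact ih (b :: t) hkb _ (by rw [List.take_succ_cons]; exact List.mem_cons_of_mem _ h)


def gpass : Nat → List String → List String
  | 0, l => l
  | k+1, l => gpass k (passK k l)


theorem gpass_sorted (k : Nat) (l : List String) (hk : k ≤ l.length)
    (hs : (l.drop k).Pairwise (· ≤ ·))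
    (hsep : ∀ a ∈ l.take k, ∀ b ∈ l.drop k, a ≤ b) :
    (gpass k l).Perm l ∧ (gpass k l).Pairwise (· ≤ ·) := by
  induction k generalizing l with
  | zero => exact ⟨List.Perm.refl l, hs⟩
  | succ k ih =>
    have hkl : k < l.length := by omega
    set l' := passK k l with hl'
    have hlen : l'.length = l.length := length_passK k l
    have hperm : l'.Perm l := perm_passK k l
    have hdrop : l'.drop (k+1) = l.drop (k+1) := drop_passK k l
    have hkl' : k < l'.length := by omega
    -- prefixes are permutations of each other
    have htp : (l'.take (k+1)).Perm (l.take (k+1)) := by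
      have h1 : l'.take (k+1) ++ l'.drop (k+1) = l' := List.take_append_drop _ _
      have h2 : l.take (k+1) ++ l.drop (k+1) = l := List.take_append_drop _ _
      have : (l'.take (k+1) ++ l.drop (k+1)).Perm (l.take (k+1) ++ l.drop (k+1)) := by
        rw [h2, ← hdrop, h1]; exact hperm
      exact (List.perm_append_right_iff _).mp this
    have hmax : ∀ x ∈ l.take (k+1), x ≤ l'.getD k "" := max_passK k l hkl
    have hget : l'.getD k "" = l'[k]'hkl' := by
      rw [List.getD_eq_getElem?_getD, List.getElem?_eq_getElem hkl']; rfl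
    have hdropk : l'.drop k = l'[k]'hkl' :: l.drop (k+1) := by
      rw [List.drop_eq_getElem_cons hkl', hdrop]
    have hmem_take : l'[k]'hkl' ∈ l.take (k+1) := by
      refine htp.mem_iff.mp ?_
      have hkt : k < (l'.take (k+1)).length := by simp; omega
      have := List.getElem_mem hkt
      simpa using this
    -- new sortedness of the dropped part
    have hs' : (l'.drop k).Pairwise (· ≤ ·) := by
      rw [hdropk]
      refine List.Pairwise.cons ?_ hs
      intro b hb
      exact hsep _ hmem_take _ hb
    have hsep' : ∀ a ∈ l'.take k, ∀ b ∈ l'.drop k, a ≤ b := by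
      intro a ha b hb
      have ha' : a ∈ l.take (k+1) := by
        refine htp.mem_iff.mp ?_
        have : l'.take k = (l'.take (k+1)).take k := by rw [List.take_take]; congr 1; omega
        rw [this] at ha
        exact List.mem_of_mem_take ha
      rw [hdropk, List.mem_cons] at hb
      rcases hb with rfl | hb
      · rw [← hget]; exact hmax a ha'
      · exact hsep a ha' b hb
    have := ih l' (by omega) hs' hsep'
    exact ⟨(this.1).trans hperm, this.2⟩


theorem inner_fold_passK (k : Nat) (l : List String) (hk : k < l.length) :
    (PySem.List.pyRange 0 (k : Int)).foldl pvSwapStep l = passK k l := by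
  rw [PySem.List.pyRange_zero_natCast, List.foldl_map]
  have : (fun (x : List String) (j : Nat) => pvSwapStep x (j : Int)) = swpN := by
    funext x j; exact swp_eq_swpN x j
  rw [this]
  exact range_foldl_swpN k l hk


theorem outer_fold_gpass (n : Nat) :
    ∀ (j : Nat), j ≤ n → ∀ l : List String, l.length = n →
    (List.range' (n - j) j).foldl
      (fun l (k : Nat) => (PySem.List.pyRange 0 ((n : Int) - (k : Int) - 1)).foldl pvSwapStep l) l
      = gpass j l := by
  intro j
  induction j with
  | zero => intro _ l _; rfl
  | succ j ih =>
    intro hj l hl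
    rw [List.range'_succ, List.foldl_cons]
    have hcast : (n : Int) - ((n - (j+1) : Nat) : Int) - 1 = ((j : Nat) : Int) := by
      rw [Nat.cast_sub (by omega : j + 1 ≤ n)]
      push_cast
      ring
    rw [hcast, inner_fold_passK j l (by omega)]
    have hstep : n - (j+1) + 1 = n - j := by omega
    rw [hstep]
    have := ih (by omega) (passK j l) (by rw [length_passK, hl])
    rw [this]
    rfl


theorem ordenar_eq_sorted (xs : List String) :
    ordenar_lista xs = PySem.List.sorted xs (fun x => x) := by
  have h1 : ordenar_lista xs = gpass xs.length xs := by
    unfold ordenar_lista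
    dsimp only
    rw [PySem.List.pyRange_zero_natCast, List.foldl_map]
    have h := outer_fold_gpass xs.length xs.length (le_refl _) xs rfl
    rw [Nat.sub_self] at h
    rw [show List.range' 0 xs.length = List.range xs.length from (List.range_eq_range' ..).symm] at h
    exact h
  have h2 := gpass_sorted xs.length xs (le_refl _)
    (by simp) (by intro a ha b hb; simp at hb)
  rw [h1]
  exact (PySem.List.sorted_id_eq_of_perm_of_pairwise xs _ h2.1 h2.2).symm

-- ===== dict part =====


def pvKey (w : String) : String := String.ofList [PySem.Chars.lowerChar (w.toList.headD 'a')]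


def pvStepA' (d : PySem.Dict String (List String)) (w : String) :
    PySem.Dict String (List String) :=
  (if d.contains (pvKey w) then d else d.insert (pvKey w) []).modify (pvKey w) []
    (fun g => g ++ [w])


theorem pvGet0 (w : String) (h : w.toList ≠ []) :
    PySem.Str.pyGet? w 0 = some (w.toList.headD 'a') := by
  cases hw : w.toList with
  | nil => exact absurd hw h
  | cons c t => simp [PySem.List.pyGet?, PySem.List.pyIdx?, hw]


theorem stepA_eq (d : PySem.Dict String (List String)) (w : String) (h : w.toList ≠ []) :
    pvStepA d w = pvStepA' d w := by
  unfold pvStepA pvStepA'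
  rw [pvGet0 w h]
  rfl


theorem getD_of_not_contains {κ ν : Type} [BEq κ] [LawfulBEq κ]
    (d : PySem.Dict κ ν) (k : κ) (v : ν) (h : d.contains k = false) :
    d.getD k v = v := by
  have : d.get? k = none := (PySem.Dict.get?_eq_none_iff_contains d k).mpr h
  simp [PySem.Dict.getD, this]


theorem getD_stepA' (d : PySem.Dict String (List String)) (w c : String) :
    (pvStepA' d w).getD c [] =
      if c = pvKey w then d.getD (pvKey w) [] ++ [w] else d.getD c [] := by
  unfold pvStepA'
  rw [PySem.Dict.getD_modify]
  have hD' : ∀ x : String,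
      (if d.contains (pvKey w) then d else d.insert (pvKey w) []).getD x [] = d.getD x [] := by
    intro x
    by_cases hc : d.contains (pvKey w)
    · rw [if_pos hc]
    · rw [if_neg hc, PySem.Dict.getD_insert]
      by_cases hx : x = pvKey w
      · rw [if_pos hx, hx, getD_of_not_contains d _ _ (by simpa using hc)]
      · rw [if_neg hx]
  rw [hD', hD']


theorem getD_foldA : ∀ (l : List String) (d : PySem.Dict String (List String)) (c : String),
    (l.foldl pvStepA' d).getD c [] = d.getD c [] ++ (l.filter (fun w => pvKey w == c)) := by
  intro l
  induction l with
  | nil => simp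
  | cons w t ih =>
    intro d c
    rw [List.foldl_cons, ih, List.filter_cons, getD_stepA']
    by_cases hc : c = pvKey w
    · rw [if_pos hc, if_pos (beq_iff_eq.mpr hc.symm), hc]
      simp
    · rw [if_neg hc, if_neg (fun h => hc (beq_iff_eq.mp h).symm)]


theorem keys_stepA' (d : PySem.Dict String (List String)) (w : String) :
    (pvStepA' d w).keys = PySem.Set.add d.keys (pvKey w) := by
  unfold pvStepA' PySem.Set.add
  by_cases hc : d.contains (pvKey w)
  · rw [if_pos hc, PySem.Dict.keys_modify, PySem.Dict.keys_insert_of_contains _ _ hc,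
      if_pos ((PySem.Set.contains_iff _ _).mpr
        ((PySem.Dict.contains_iff_mem_keys d (pvKey w)).mp hc))]
  · have hc' : d.contains (pvKey w) = false := by simpa using hc
    have hmem : pvKey w ∉ d.keys := fun h =>
      hc ((PySem.Dict.contains_iff_mem_keys d (pvKey w)).mpr h)
    rw [if_neg hc, PySem.Dict.keys_modify,
      PySem.Dict.keys_insert_of_contains _ _ (by rw [PySem.Dict.contains_insert, beq_self_eq_true, Bool.true_or]),
      PySem.Dict.keys_insert_of_not_contains _ _ hc',
      if_neg (fun h => hmem ((PySem.Set.contains_iff _ _).mp h))]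


theorem keys_foldA : ∀ (l : List String) (d : PySem.Dict String (List String)),
    (l.foldl pvStepA' d).keys = PySem.Set.update d.keys (l.map pvKey) := by
  intro l
  induction l with
  | nil => intro d; rfl
  | cons w t ih =>
    intro d
    rw [List.foldl_cons, ih, keys_stepA', List.map_cons]
    rfl

-- loop 2 of A


theorem loop2_keys (f : List String → List String) :
    ∀ (ks : List String) (d : PySem.Dict String (List String)),
    (∀ k ∈ ks, k ∈ d.keys) →
    (ks.foldl (fun d ch => d.insert ch (f (d.getD ch []))) d).keys = d.keys := by
  intro ks
  induction ks with
  | nil => intro d _; rfl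
  | cons k t ih =>
    intro d hks
    rw [List.foldl_cons]
    have hc : d.contains k = true :=
      (PySem.Dict.contains_iff_mem_keys d k).mpr (hks k List.mem_cons_self)
    have hkeys : (d.insert k (f (d.getD k []))).keys = d.keys :=
      PySem.Dict.keys_insert_of_contains _ _ hc
    rw [ih _ (by rw [hkeys]; exact fun x hx => hks x (List.mem_cons_of_mem _ hx)), hkeys]


theorem loop2_getD (f : List String → List String) :
    ∀ (ks : List String) (d : PySem.Dict String (List String)) (c : String), ks.Nodup →
    (ks.foldl (fun d ch => d.insert ch (f (d.getD ch []))) d).getD c [] =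
      if c ∈ ks then f (d.getD c []) else d.getD c [] := by
  intro ks
  induction ks with
  | nil => intro d c _; simp
  | cons k t ih =>
    intro d c hnd
    rw [List.foldl_cons, ih _ _ (List.nodup_cons.mp hnd).2]
    by_cases hck : c = k
    · have hct : c ∉ t := hck ▸ (List.nodup_cons.mp hnd).1
      rw [if_neg hct, PySem.Dict.getD_insert, if_pos hck, if_pos (by simp [hck]), hck]
    · rw [PySem.Dict.getD_insert, if_neg hck]
      by_cases hct : c ∈ t
      · rw [if_pos hct, if_pos (List.mem_cons_of_mem _ hct)]
      · rw [if_neg hct, if_neg (by simp [hck, hct])]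

-- B side


def pvStepB0' (d : PySem.Dict String (List String)) (w : String) :
    PySem.Dict String (List String) := d.insert (pvKey w) []


def pvStepB1' (d : PySem.Dict String (List String)) (w : String) :
    PySem.Dict String (List String) := d.modify (pvKey w) [] (fun g => g ++ [w])


theorem getD_foldB0 : ∀ (l : List String) (d : PySem.Dict String (List String)),
    (∀ c, d.getD c [] = []) → ∀ c, (l.foldl pvStepB0' d).getD c [] = [] := by
  intro l
  induction l with
  | nil => intro d h c; exact h c
  | cons w t ih =>
    intro d h c
    rw [List.foldl_cons]
    refine ih _ (fun x => ?_) c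
    unfold pvStepB0'
    rw [PySem.Dict.getD_insert]
    split
    · rfl
    · exact h x


theorem keys_stepB0' (d : PySem.Dict String (List String)) (w : String) :
    (pvStepB0' d w).keys = PySem.Set.add d.keys (pvKey w) := by
  unfold pvStepB0' PySem.Set.add
  by_cases hc : d.contains (pvKey w)
  · rw [PySem.Dict.keys_insert_of_contains _ _ hc,
      if_pos ((PySem.Set.contains_iff _ _).mpr
        ((PySem.Dict.contains_iff_mem_keys d (pvKey w)).mp hc))]
  · rw [PySem.Dict.keys_insert_of_not_contains _ _ (by simpa using hc),
      if_neg (fun h => hc ((PySem.Dict.contains_iff_mem_keys d (pvKey w)).mpr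
        ((PySem.Set.contains_iff _ _).mp h)))]


theorem keys_foldB0 : ∀ (l : List String) (d : PySem.Dict String (List String)),
    (l.foldl pvStepB0' d).keys = PySem.Set.update d.keys (l.map pvKey) := by
  intro l
  induction l with
  | nil => intro d; rfl
  | cons w t ih => intro d; rw [List.foldl_cons, ih, keys_stepB0', List.map_cons]; rfl


theorem getD_stepB1' (d : PySem.Dict String (List String)) (w c : String) :
    (pvStepB1' d w).getD c [] =
      if c = pvKey w then d.getD (pvKey w) [] ++ [w] else d.getD c [] := by
  unfold pvStepB1'
  rw [PySem.Dict.getD_modify]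


theorem getD_foldB1 : ∀ (xs : List String) (d : PySem.Dict String (List String)) (c : String),
    (xs.foldl pvStepB1' d).getD c [] = d.getD c [] ++ (xs.filter (fun w => pvKey w == c)) := by
  intro xs
  induction xs with
  | nil => simp
  | cons w t ih =>
    intro d c
    rw [List.foldl_cons, ih, List.filter_cons, getD_stepB1']
    by_cases hc : c = pvKey w
    · rw [if_pos hc, if_pos (beq_iff_eq.mpr hc.symm), hc]
      simp
    · rw [if_neg hc, if_neg (fun h => hc (beq_iff_eq.mp h).symm)]


theorem keys_stepB1' (d : PySem.Dict String (List String)) (w : String) :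
    (pvStepB1' d w).keys = PySem.Set.add d.keys (pvKey w) := by
  unfold pvStepB1' PySem.Set.add
  by_cases hc : d.contains (pvKey w)
  · rw [PySem.Dict.keys_modify, PySem.Dict.keys_insert_of_contains _ _ hc,
      if_pos ((PySem.Set.contains_iff _ _).mpr
        ((PySem.Dict.contains_iff_mem_keys d (pvKey w)).mp hc))]
  · rw [PySem.Dict.keys_modify, PySem.Dict.keys_insert_of_not_contains _ _ (by simpa using hc),
      if_neg (fun h => hc ((PySem.Dict.contains_iff_mem_keys d (pvKey w)).mpr
        ((PySem.Set.contains_iff _ _).mp h)))]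


theorem keys_foldB1 : ∀ (xs : List String) (d : PySem.Dict String (List String)),
    (xs.foldl pvStepB1' d).keys = PySem.Set.update d.keys (xs.map pvKey) := by
  intro xs
  induction xs with
  | nil => intro d; rfl
  | cons w t ih => intro d; rw [List.foldl_cons, ih, keys_stepB1', List.map_cons]; rfl


theorem set_update_of_subset {α : Type} [BEq α] [LawfulBEq α] :
    ∀ (xs : List α) (s : PySem.Set α), (∀ x ∈ xs, x ∈ s) → PySem.Set.update s xs = s := by
  intro xs
  induction xs with
  | nil => intro s _; rfl
  | cons x t ih =>
    intro s h
    have : PySem.Set.add s x = s := by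
      unfold PySem.Set.add
      rw [if_pos ((PySem.Set.contains_iff _ _).mpr (h x List.mem_cons_self))]
    show PySem.Set.update (PySem.Set.add s x) t = s
    rw [this]
    exact ih s (fun y hy => h y (List.mem_cons_of_mem _ hy))


theorem filter_sorted (l : List String) (p : String → Bool) :
    (PySem.List.sorted l (fun x => x)).filter p
      = PySem.List.sorted (l.filter p) (fun x => x) := by
  refine (PySem.List.sorted_id_eq_of_perm_of_pairwise _ _ ?_ ?_).symm
  · exact (PySem.List.sorted_perm l (fun x => x) false).filter p
  · exact (PySem.List.sorted_pairwise l (fun x => x)).sublist List.filter_sublist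


theorem stepB0_eq (d : PySem.Dict String (List String)) (w : String) (h : w.toList ≠ []) :
    pvStepB0 d w = pvStepB0' d w := by
  unfold pvStepB0 pvStepB0'
  rw [pvGet0 w h]
  rfl


theorem stepB1_eq (d : PySem.Dict String (List String)) (w : String) (h : w.toList ≠ []) :
    pvStepB1 d w = pvStepB1' d w := by
  unfold pvStepB1 pvStepB1'
  rw [pvGet0 w h]
  rfl


theorem main_eq (l : List String) (hpre : ∀ w ∈ l, w.toList ≠ []) :
    agrupar_e_ordenar l = agrupar_e_ordenar_alt l := by
  unfold agrupar_e_ordenar agrupar_e_ordenar_alt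
  dsimp only
  rw [PySem.List.foldl_congr_mem l pvStepA pvStepA' _
    (fun acc x hx => stepA_eq acc x (hpre x hx))]
  rw [PySem.List.foldl_congr_mem l pvStepB0 pvStepB0' PySem.Dict.empty
    (fun acc x hx => stepB0_eq acc x (hpre x hx))]
  rw [PySem.List.foldl_congr_mem (PySem.List.sorted l (fun x => x)) pvStepB1 pvStepB1' _
    (fun acc x hx => stepB1_eq acc x
      (hpre x ((PySem.List.sorted_perm l (fun x => x) false).mem_iff.mp hx)))]
  set K : List String := PySem.Set.update (PySem.Dict.empty (κ := String) (ν := List String)).keys (l.map pvKey) with hK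
  have hkeysA1 : (l.foldl pvStepA' PySem.Dict.empty).keys = K := keys_foldA l _
  have hndK : K.Nodup := by
    rw [hK]
    exact PySem.Set.nodup_update _ _ (by simp [PySem.Dict.keys_empty])
  have hmemK : ∀ c, c ∈ K ↔ c ∈ l.map pvKey := by
    intro c
    rw [hK]
    rw [PySem.Set.mem_update]
    simp [PySem.Dict.keys_empty]
  -- A final dict
  set d1 := l.foldl pvStepA' PySem.Dict.empty with hd1
  set d2 := d1.keys.foldl (fun d chave => d.insert chave (ordenar_lista (d.getD chave []))) d1 with hd2
  have hkeysA2 : d2.keys = K := by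
    rw [hd2, loop2_keys _ _ _ (fun k hk => hk), hkeysA1]
  have hgetA1 : ∀ c, d1.getD c [] = l.filter (fun w => pvKey w == c) := by
    intro c
    rw [hd1, getD_foldA, PySem.Dict.getD_empty]
    rfl
  have hgetA2 : ∀ c, c ∈ K → d2.getD c [] = ordenar_lista (l.filter (fun w => pvKey w == c)) := by
    intro c hc
    rw [hd2, loop2_getD _ _ _ _ (by rw [hkeysA1]; exact hndK),
      if_pos (by rw [hkeysA1]; exact hc), hgetA1]
  -- B final dict
  set d0 := l.foldl pvStepB0' PySem.Dict.empty with hd0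
  set dB := (PySem.List.sorted l (fun x => x)).foldl pvStepB1' d0 with hdB
  have hkeysB0 : d0.keys = K := keys_foldB0 l _
  have hkeysB : dB.keys = K := by
    rw [hdB, keys_foldB1, hkeysB0]
    refine set_update_of_subset _ _ ?_
    intro x hx
    rcases List.mem_map.mp hx with ⟨w, hw, rfl⟩
    exact (hmemK _).mpr (List.mem_map_of_mem ((PySem.List.sorted_perm l (fun x => x) false).mem_iff.mp hw))
  have hgetB : ∀ c, dB.getD c [] = (PySem.List.sorted l (fun x => x)).filter (fun w => pvKey w == c) := by
    intro c
    rw [hdB, getD_foldB1, getD_foldB0 l _ (fun c => by rw [PySem.Dict.getD_empty]) c]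
    rfl
  -- items
  rw [PySem.Dict.items_eq_map_keys d2 (by rw [hkeysA2]; exact hndK) [],
    PySem.Dict.items_eq_map_keys dB (by rw [hkeysB]; exact hndK) [],
    hkeysA2, hkeysB]
  refine List.map_congr_left ?_
  intro c hc
  rw [hgetA2 c hc, hgetB c, ordenar_eq_sorted, filter_sorted]


-- ===== VERDICT (by name: the statement is the Claim_ definition above) =====
theorem agrupar_e_ordenar_spec : Claim_equal_agrupar_e_ordenar := by
  intro lista_palavras _ hpre
  exact main_eq lista_palavras hpre
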